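-- pv_equiv track=rewrite | github.com/DarkHawk727/CS348-Project | queryPages/custom_query.py | is_query_safe
-- ===== SOURCE A (Python) =====
-- def is_query_safe(query: str) -> bool:
--     unsafe_keywords = [
--         "INSERT",
--         "UPDATE",
--         "DELETE",
--         "CREATE",
--         "DROP",
--         "ALTER",
--         "TRUNCATE",
--         "REPLACE",
--         "MERGE",
--     ]
--
--     query_upper = query.upper()
--
--     for keyword in unsafe_keywords:
--         if keyword in query_upper:
--             return False
--     return True
-- ===== SOURCE B (Python) =====
-- def is_query_safe(query: str) -> bool:
--     KEYWORDS = {"INSERT", "UPDATE", "DELETE", "CREATE", "DROP",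
--                 "ALTER", "TRUNCATE", "REPLACE", "MERGE"}
--     lengths = sorted({len(k) for k in KEYWORDS})  # [4, 5, 6, 7, 8]
--     q = query.upper()
--     for i in range(len(q)):
--         for L in lengths:
--             if q[i:i+L] in KEYWORDS:
--                 return False
--     return True
-- ===== Notes on version B (the rewrite author's own statement) =====
-- stated objective: alternative
-- what changed: B inverts the search direction: instead of scanning the text once per keyword (A's nine substring searches), it slides fixed-length windows (one per distinct keyword length) over the uppercased query and tests each window for membership in a hash set of the keywords.
import Mathlib
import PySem

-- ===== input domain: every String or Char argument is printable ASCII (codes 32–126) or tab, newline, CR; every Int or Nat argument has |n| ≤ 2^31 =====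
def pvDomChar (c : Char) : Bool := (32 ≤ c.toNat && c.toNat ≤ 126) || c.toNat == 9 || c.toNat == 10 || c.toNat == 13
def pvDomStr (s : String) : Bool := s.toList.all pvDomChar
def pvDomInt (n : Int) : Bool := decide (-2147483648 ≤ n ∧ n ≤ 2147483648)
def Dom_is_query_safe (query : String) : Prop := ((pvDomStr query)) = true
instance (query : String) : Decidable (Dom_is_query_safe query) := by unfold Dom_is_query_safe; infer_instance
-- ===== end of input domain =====

-- B inverts the search direction: instead of A's nine substring scans (one per keyword), it
-- slides fixed-length windows over the uppercased query and tests each window for membership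
-- in a set of the keywords (alternative; same result, different algorithm).

-- ===== PORT A =====
-- A's loop: for keyword in unsafe_keywords: if keyword in query_upper: return False
def pvALoop (kws : List String) (qUpper : List Char) : Bool :=
  match kws with
  | [] => true
  | k :: rest => if PySem.Chars.isIn k.toList qUpper then false else pvALoop rest qUpper

def is_query_safe (query : String) : Bool :=
  pvALoop ["INSERT", "UPDATE", "DELETE", "CREATE", "DROP",
           "ALTER", "TRUNCATE", "REPLACE", "MERGE"] (PySem.Chars.upper query.toList)

-- ===== PORT B =====
-- B's KEYWORDS set (a Python set literal of distinct strings)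
def pvKWB : PySem.Set (List Char) :=
  PySem.Set.ofList ["INSERT".toList, "UPDATE".toList, "DELETE".toList, "CREATE".toList,
                    "DROP".toList, "ALTER".toList, "TRUNCATE".toList, "REPLACE".toList,
                    "MERGE".toList]

-- lengths = sorted({len(k) for k in KEYWORDS})
def pvLengthsB : List Nat :=
  PySem.List.sorted (PySem.Set.ofList (pvKWB.map List.length)) (fun x => x) false

-- for i in range(len(q)): for L in lengths: if q[i:i+L] in KEYWORDS: return False
-- (the slice q[i:i+L], with 0 ≤ i < len(q) and L ≥ 0, is exactly (q.drop i).take L)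
def is_query_safe_alt (query : String) : Bool :=
  let q := PySem.Chars.upper query.toList
  ! ((List.range q.length).any fun i =>
      pvLengthsB.any fun L => pvKWB.contains ((q.drop i).take L))

-- ===== PRECONDITION & SPEC =====
def Spec_is_query_safe (query : String) (out : Bool) : Prop := out = is_query_safe_alt query
instance (query : String) (out : Bool) : Decidable (Spec_is_query_safe query out) := by unfold Spec_is_query_safe; infer_instance

-- ===== CLAIM (what is proved, stated in full; the proofs are below) =====
def Claim_equal_is_query_safe : Prop := ∀ (query : String), Dom_is_query_safe query → Spec_is_query_safe query (is_query_safe query)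

-- ===== LEMMAS AND PROOFS =====

-- A's early-return loop as a Boolean: safe iff no keyword occurs
theorem pvALoop_eq (kws : List String) (q : List Char) :
    pvALoop kws q = ! kws.any (fun k => PySem.Chars.isIn k.toList q) := by
  induction kws with
  | nil => simp [pvALoop]
  | cons k rest ih =>
    simp only [pvALoop, List.any_cons, Bool.not_or]
    split_ifs with h
    · simp [h]
    · simp only [Bool.not_eq_true] at h
      simp [h, ih]

-- every keyword's length is one of the window lengths B uses
theorem pvLen_mem : ∀ k ∈ pvKWB, k.length ∈ pvLengthsB := by decide

-- no keyword is empty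
theorem pvKW_ne_nil : ∀ k ∈ pvKWB, k ≠ [] := by decide

-- the core bridge: a window of some keyword's length matches a keyword at some position
-- iff some keyword occurs as a substring
theorem pvBridge (q : List Char) :
    ((List.range q.length).any fun i =>
        pvLengthsB.any fun L => pvKWB.contains ((q.drop i).take L))
      = pvKWB.any (fun k => PySem.Chars.isIn k q) := by
  rw [Bool.eq_iff_iff]
  simp only [List.any_eq_true, List.mem_range, PySem.Set.contains_iff]
  constructor
  · rintro ⟨i, -, L, -, hmem⟩
    refine ⟨(q.drop i).take L, hmem, ?_⟩
    exact (PySem.Chars.exists_prefix_drop_iff_isIn _ q).mp ⟨i, List.take_prefix L (q.drop i)⟩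
  · rintro ⟨k, hk, hin⟩
    obtain ⟨j, hpre⟩ := (PySem.Chars.exists_prefix_drop_iff_isIn k q).mpr hin
    have hjlt : j < q.length := by
      by_contra hge
      rw [List.drop_eq_nil_of_le (Nat.le_of_not_lt hge)] at hpre
      exact pvKW_ne_nil k hk (List.prefix_nil.mp hpre)
    refine ⟨j, hjlt, k.length, pvLen_mem k hk, ?_⟩
    rw [← List.prefix_iff_eq_take.mp hpre]
    exact hk

theorem pvMain (query : String) : is_query_safe query = is_query_safe_alt query := by
  show pvALoop _ _ = _
  simp only [is_query_safe_alt]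
  rw [pvALoop_eq, pvBridge]
  have hKW : pvKWB = ["INSERT".toList, "UPDATE".toList, "DELETE".toList, "CREATE".toList,
      "DROP".toList, "ALTER".toList, "TRUNCATE".toList, "REPLACE".toList, "MERGE".toList] := by
    decide
  simp only [hKW, List.any_cons, List.any_nil]

-- ===== VERDICT (by name: the statement is the Claim_ definition above) =====
theorem is_query_safe_spec : Claim_equal_is_query_safe := by
  intro query _
  unfold Spec_is_query_safe
  exact pvMain query
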